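-- pv_equiv track=rewrite | github.com/frapla/aihiii | src/data/fe_processing/all_iso_scores_val_chain.py | isolate
-- ===== SOURCE A (Python) =====
-- from collections import defaultdict
-- from typing import Dict, List, Literal, Optional, Tuple
--
-- def isolate(names: List[str]) -> Dict[str, List[str]]:
--     groups = defaultdict(list)
--
--     for name in names:
--         if name.endswith("Report"):
--             groups[name].append(name)
--         else:
--             groups[name[:-6]].append(name)
--
--     return dict(groups)
-- ===== SOURCE B (Python) =====
-- def isolate(names):
--     def key(name):
--         return name if name.endswith("Report") else name[:-6]
--     order = []
--     for name in names:
--         k = key(name)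
--         if k not in order:
--             order.append(k)
--     return {k: [n for n in names if key(n) == k] for k in order}
-- ===== Notes on version B (the rewrite author's own statement) =====
-- stated objective: alternative
-- what changed: Replaces the defaultdict single-pass accumulation with a two-phase plan: collect the distinct group keys in first-occurrence order, then build each group by filtering the input list per key.
import Mathlib
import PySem

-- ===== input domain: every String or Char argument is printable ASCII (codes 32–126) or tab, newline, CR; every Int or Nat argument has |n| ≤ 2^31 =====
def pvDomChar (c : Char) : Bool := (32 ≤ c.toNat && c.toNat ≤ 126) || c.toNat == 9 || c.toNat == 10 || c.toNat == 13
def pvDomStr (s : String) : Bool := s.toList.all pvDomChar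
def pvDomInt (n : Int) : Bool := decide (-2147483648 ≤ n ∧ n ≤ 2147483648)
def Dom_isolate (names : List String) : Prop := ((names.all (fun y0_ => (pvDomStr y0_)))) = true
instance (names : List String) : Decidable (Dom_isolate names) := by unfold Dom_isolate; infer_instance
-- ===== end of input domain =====

-- B builds the grouping in two phases (distinct keys in first-occurrence order, then a filter per key)
-- instead of A's single-pass defaultdict accumulation; same return value (alternative decomposition).


-- ===== PORT A =====
def isolate (names : List String) : List (String × List String) :=
  (names.foldl
    (fun groups name =>
      if PySem.Str.endswith name "Report" then
        groups.modify name [] (· ++ [name])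
      else
        groups.modify (PySem.Str.slice name none (some (-6))) [] (· ++ [name]))
    PySem.Dict.empty).items

-- ===== PORT B =====
def bKey (name : String) : String :=
  if PySem.Str.endswith name "Report" then name else PySem.Str.slice name none (some (-6))

def isolate_alt (names : List String) : List (String × List String) :=
  let order := names.foldl
    (fun seen name =>
      let k := bKey name
      if seen.contains k then seen else seen ++ [k]) []
  order.map (fun k => (k, names.filter (fun n => bKey n == k)))

-- ===== PRECONDITION & SPEC =====
def Spec_isolate (names : List String) (out : List (String × List String)) : Prop := out = isolate_alt names
instance (names : List String) (out : List (String × List String)) : Decidable (Spec_isolate names out) := by unfold Spec_isolate; infer_instance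

-- ===== CLAIM (what is proved, stated in full; the proofs are below) =====
def Claim_equal_isolate : Prop := ∀ (names : List String), Dom_isolate names → Spec_isolate names (isolate names)

-- ===== LEMMAS AND PROOFS =====

-- A's fold body with the branch condition pushed into the key function
theorem isolate_eq_keyed_fold (names : List String) :
    isolate names =
      (names.foldl (fun d n => d.modify (bKey n) [] (· ++ [n])) PySem.Dict.empty).items := by
  unfold isolate
  congr 1
  apply PySem.List.foldl_congr_mem
  intro d n _
  unfold bKey
  exact (apply_ite (fun k => d.modify k [] (· ++ [n])) _ _ _).symm

-- the items of A's grouping dict, key by key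
theorem keyed_fold_items (names : List String) :
    (names.foldl (fun d n => d.modify (bKey n) [] (· ++ [n])) PySem.Dict.empty).items =
    (PySem.Set.ofList (names.map bKey)).map
      (fun k => (k, names.filter (fun n => bKey n == k))) := by
  have hnd : (names.foldl (fun d n => d.modify (bKey n) [] (· ++ [n])) PySem.Dict.empty).keys.Nodup :=
    PySem.Dict.nodup_keys_foldl_modify_key names bKey []
      (fun (_ : PySem.Dict String (List String)) (n : String) (v : List String) => v ++ [n])
      PySem.Dict.empty PySem.Dict.nodup_keys_empty
  rw [PySem.Dict.items_eq_map_keys _ hnd [], PySem.Dict.keys_foldl_modify_key]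
  simp only [PySem.Dict.keys_empty, PySem.Set.update_nil_left]
  apply List.map_congr_left
  intro k _
  have hfold : names.foldl (fun d n => d.modify (bKey n) [] (· ++ [n])) PySem.Dict.empty
      = (names.map (fun n => (bKey n, n))).foldl (fun d p => d.modify p.1 [] (· ++ [p.2]))
          PySem.Dict.empty := by
    rw [List.foldl_map]
  rw [hfold, PySem.Dict.getD_foldl_modify_append, PySem.Dict.getD_empty]
  simp [List.filter_map, List.map_map, Function.comp_def]

-- B's first pass is exactly the first-occurrence key list
theorem alt_order_eq_ofList (names : List String) :
    names.foldl (fun seen name =>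
      let k := bKey name
      if seen.contains k then seen else seen ++ [k]) [] = PySem.Set.ofList (names.map bKey) := by
  rw [← PySem.Set.update_nil_left, PySem.Set.update_map_eq_foldl_add]
  rfl

-- ===== VERDICT (by name: the statement is the Claim_ definition above) =====
theorem isolate_spec : Claim_equal_isolate := by
  intro names _
  unfold Spec_isolate isolate_alt
  rw [isolate_eq_keyed_fold, keyed_fold_items, alt_order_eq_ofList]
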